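-- pv_equiv track=rewrite | github.com/AryanAngral/PrivateCode | TCS/sol1.py | convert_to_number
-- ===== SOURCE A (Python) =====
-- def convert_to_number(word):
--     """Converts a word representing a number into an integer."""
--     digit_map = {
--         "one": 1, "two": 2, "three": 3, "four": 4,
--         "five": 5, "six": 6, "seven": 7, "eight": 8, "nine": 9
--     }
--     number = 0
--     for digit in word.split("c"):
--         if digit not in digit_map:
--             return None
--         number = number * 10 + digit_map[digit]
--     return number
-- ===== SOURCE B (Python) =====
-- def convert_to_number(word):
--     """Converts a word representing a number into an integer."""
--     digit_map = {
--         "one": 1, "two": 2, "three": 3, "four": 4,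
--         "five": 5, "six": 6, "seven": 7, "eight": 8, "nine": 9
--     }
--     tokens = word.split("c")
--     if all(t in digit_map for t in tokens):
--         return sum(digit_map[t] * 10 ** i for i, t in enumerate(reversed(tokens)))
--     return None
-- ===== Notes on version B (the rewrite author's own statement) =====
-- stated objective: alternative
-- what changed: Replaces the single Horner-style accumulation loop with early return by a separate all() validation pass followed by a closed-form positional sum (digit * 10**i over the reversed token list).
import Mathlib
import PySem

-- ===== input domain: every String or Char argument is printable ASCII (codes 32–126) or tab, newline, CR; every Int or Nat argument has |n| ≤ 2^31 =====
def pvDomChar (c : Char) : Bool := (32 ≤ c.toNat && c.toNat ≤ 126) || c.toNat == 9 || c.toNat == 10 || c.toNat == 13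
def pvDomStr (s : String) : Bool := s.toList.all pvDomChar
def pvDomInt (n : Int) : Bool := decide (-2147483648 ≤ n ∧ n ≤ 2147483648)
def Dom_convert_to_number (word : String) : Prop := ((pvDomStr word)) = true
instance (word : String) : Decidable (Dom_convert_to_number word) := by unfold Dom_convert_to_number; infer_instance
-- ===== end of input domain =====

-- B restates A's positional Horner loop as a validation pass plus a closed-form positional sum (objective: alternative).

-- ===== PORT A =====
-- the dict literal digit_map (shared data of both Pythons)
def pvDigitMap : PySem.Dict String Int :=
  PySem.Dict.ofList [("one", 1), ("two", 2), ("three", 3), ("four", 4),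
    ("five", 5), ("six", 6), ("seven", 7), ("eight", 8), ("nine", 9)]

-- the for-loop of A: accumulator `number`, early `return None` on an unknown token
def pvLoopA : List String → Int → Option Int
  | [], number => some number
  | digit :: rest, number =>
    match pvDigitMap.get? digit with
    | none => none
    | some v => pvLoopA rest (number * 10 + v)

-- word.split("c"): sep "c" ≠ "" so split? is some; .getD [] is exact
def convert_to_number (word : String) : Option Int :=
  pvLoopA ((PySem.Str.split? word "c").getD []) 0

-- ===== PORT B =====
-- digit_map[t] after the all() check: get? is some, so `.getD 0` is exact here
def convert_to_number_alt (word : String) : Option Int :=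
  let tokens := ((PySem.Str.split? word "c").getD [])
  if tokens.all (fun t => (pvDigitMap.get? t).isSome) then
    some (((PySem.List.enumerate tokens.reverse 0).map
      (fun p => (pvDigitMap.get? p.2).getD 0 * 10 ^ p.1.toNat)).sum)
  else
    none

-- ===== PRECONDITION & SPEC =====
def Spec_convert_to_number (word : String) (out : Option Int) : Prop := out = convert_to_number_alt word
instance (word : String) (out : Option Int) : Decidable (Spec_convert_to_number word out) := by unfold Spec_convert_to_number; infer_instance

-- ===== CLAIM (what is proved, stated in full; the proofs are below) =====
def Claim_equal_convert_to_number : Prop := ∀ (word : String), Dom_convert_to_number word → Spec_convert_to_number word (convert_to_number word)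

-- ===== LEMMAS AND PROOFS =====

-- B's positional sum, as a proof abbreviation (definitionally the body of convert_to_number_alt)
def pvVal (ts : List String) : Int :=
  ((PySem.List.enumerate ts.reverse 0).map
    (fun p => (pvDigitMap.get? p.2).getD 0 * 10 ^ p.1.toNat)).sum

lemma pvVal_cons (t : String) (rest : List String) :
    pvVal (t :: rest) = (pvDigitMap.get? t).getD 0 * 10 ^ rest.length + pvVal rest := by
  simp [pvVal, List.reverse_cons, PySem.List.enumerate_append]
  ring

lemma pvLoopA_eq (ts : List String) (n : Int) :
    pvLoopA ts n =
      if ts.all (fun t => (pvDigitMap.get? t).isSome) then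
        some (n * 10 ^ ts.length + pvVal ts)
      else none := by
  induction ts generalizing n with
  | nil => simp [pvLoopA, pvVal]
  | cons t rest ih =>
    cases h : pvDigitMap.get? t with
    | none => simp [pvLoopA, h]
    | some v =>
      simp only [pvLoopA, ih, List.all_cons, h, Option.isSome_some, Bool.true_and]
      split_ifs with hv
      · rw [pvVal_cons, h]
        simp only [Option.getD_some, List.length_cons]
        congr 1
        ring
      · rfl

-- ===== VERDICT (by name: the statement is the Claim_ definition above) =====
theorem convert_to_number_spec : Claim_equal_convert_to_number := by
  intro word _
  show convert_to_number word = convert_to_number_alt word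
  simp only [convert_to_number, convert_to_number_alt, pvLoopA_eq]
  split_ifs with h
  · simp [pvVal]
  · rfl
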